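-- pv_equiv track=rewrite | github.com/randgun/sglang | python/sglang/srt/hardware_backend/npu/pdmutex/npu_pdmutex_context.py | _divide_cubes
-- ===== SOURCE A (Python) =====
-- from typing import List, Tuple, Optional
--
-- def _divide_cubes(total_cubes: int, groups: int) -> List[Tuple[int, int]]:
--     min_decode = 2
--     if total_cubes - min_decode < min_decode:
--         raise ValueError(f"Total cubes {total_cubes} too small for partitioning.")
--
--     possible = []
--     for prefill in range(total_cubes - min_decode, total_cubes // 2, -1):
--         decode = total_cubes - prefill
--         if decode >= min_decode and prefill >= decode:
--             possible.append((prefill, decode))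
--
--     if not possible:
--         raise ValueError(f"No valid partition for total_cubes={total_cubes}")
--
--     if len(possible) >= groups:
--         step = max(1, len(possible) // groups)
--         selected = possible[::step][:groups]
--     else:
--         selected = possible
--
--     selected.sort(reverse=True)
--     return selected
-- ===== SOURCE B (Python) =====
-- from typing import List, Tuple
--
--
-- def _divide_cubes(total_cubes: int, groups: int) -> List[Tuple[int, int]]:
--     # The valid partitions are (total-2, 2), (total-3, 3), ... down to the
--     # balanced split, already in descending order; emit the sampled ones
--     # directly instead of materialising, slicing and re-sorting the list.
--     min_decode = 2
--     n = total_cubes - min_decode - total_cubes // 2  # number of valid partitions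
--     if n <= 0:
--         raise ValueError(f"Total cubes {total_cubes} too small for partitioning.")
--     step = max(1, n // groups)
--     count = min(n, groups)
--     return [(total_cubes - min_decode - i * step, min_decode + i * step)
--             for i in range(count)]
-- ===== Notes on version B (the rewrite author's own statement) =====
-- stated objective: alternative
-- what changed: Instead of building the full list of partitions, filtering, slicing with a stride and re-sorting, B computes the number of valid partitions and the sampling stride arithmetically and emits only the sampled (prefill, decode) pairs directly.
-- outside the precondition, e.g. on _divide_cubes(10, -1): A returns [(8, 2), (7, 3)], B returns []
import Mathlib
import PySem

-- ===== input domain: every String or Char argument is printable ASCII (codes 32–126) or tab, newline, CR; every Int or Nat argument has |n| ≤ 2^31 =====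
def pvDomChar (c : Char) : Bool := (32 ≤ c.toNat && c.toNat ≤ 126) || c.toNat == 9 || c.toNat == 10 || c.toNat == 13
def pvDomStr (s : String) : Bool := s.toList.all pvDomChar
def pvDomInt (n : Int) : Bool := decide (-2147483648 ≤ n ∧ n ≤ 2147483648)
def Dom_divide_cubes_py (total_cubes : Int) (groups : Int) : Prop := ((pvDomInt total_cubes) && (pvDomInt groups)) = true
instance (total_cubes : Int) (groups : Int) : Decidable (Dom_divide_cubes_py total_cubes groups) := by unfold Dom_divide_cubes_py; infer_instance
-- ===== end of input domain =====

-- B replaces A's build-filter-slice-sort pipeline by arithmetic on the partition count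
-- and sampling stride, emitting only the sampled (prefill, decode) pairs directly.

-- ===== PORT A =====
def divide_cubes_py (total_cubes : Int) (groups : Int) : List (Int × Int) :=
  if total_cubes - 2 < 2 then []  -- raise ValueError (excluded by Pre_)
  else
    -- possible.append(...) ported as cons + one final reverse (same list, linear time)
    let possible :=
      ((PySem.List.pyRange (total_cubes - 2) (PySem.Int.floordiv total_cubes 2) (-1)).foldl
        (fun acc prefill =>
          let decode := total_cubes - prefill
          if 2 ≤ decode ∧ decode ≤ prefill then (prefill, decode) :: acc else acc) []).reverse
    if possible = [] then []  -- raise ValueError (excluded by Pre_)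
    else
      let selected :=
        if groups ≤ (possible.length : Int) then
          let step := max 1 (PySem.Int.floordiv (possible.length : Int) groups)
          PySem.List.slice ((PySem.List.slice? possible none none step).getD []) none (some groups)
        else possible
      PySem.List.sorted2 selected Prod.fst Prod.snd true

-- ===== PORT B =====
def divide_cubes_py_alt (total_cubes : Int) (groups : Int) : List (Int × Int) :=
  let n := total_cubes - 2 - PySem.Int.floordiv total_cubes 2
  if n ≤ 0 then []  -- raise ValueError (excluded by Pre_)
  else
    let step := max 1 (PySem.Int.floordiv n groups)
    let count := min n groups
    (PySem.List.pyRange 0 count 1).map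
      (fun i => (total_cubes - 2 - i * step, 2 + i * step))

-- ===== PRECONDITION & SPEC =====
-- Pre_ is the function's natural domain: A raises ValueError for total_cubes ≤ 4 and
-- ZeroDivisionError for groups = 0, and a negative group count is outside the natural
-- domain (there A's value is an artefact of Python's negative slice end), so Pre_
-- requires total_cubes ≥ 5 and groups ≥ 1.
def Pre_divide_cubes_py (total_cubes : Int) (groups : Int) : Prop :=
  5 ≤ total_cubes ∧ 1 ≤ groups
instance (total_cubes : Int) (groups : Int) : Decidable (Pre_divide_cubes_py total_cubes groups) := by unfold Pre_divide_cubes_py; infer_instance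

def pvWitness_divide_cubes_py : Int × Int := (10, 3)

def Spec_divide_cubes_py (total_cubes : Int) (groups : Int) (out : List (Int × Int)) : Prop := out = divide_cubes_py_alt total_cubes groups
instance (total_cubes : Int) (groups : Int) (out : List (Int × Int)) : Decidable (Spec_divide_cubes_py total_cubes groups out) := by unfold Spec_divide_cubes_py; infer_instance

-- ===== CLAIM (what is proved, stated in full; the proofs are below) =====
def Claim_equal_divide_cubes_py : Prop := ∀ (total_cubes : Int) (groups : Int), Dom_divide_cubes_py total_cubes groups → Pre_divide_cubes_py total_cubes groups → Spec_divide_cubes_py total_cubes groups (divide_cubes_py total_cubes groups)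

-- ===== LEMMAS AND PROOFS =====

-- The common normal form: the sampled partitions as a map over an index range.
def pvMid (t step : Int) (c : Nat) : List (Int × Int) :=
  (List.range c).map (fun (k : Nat) => (t - 2 - step * (k : Int), 2 + step * (k : Int)))

-- A strictly fst-descending list is its own reverse sort under Python's tuple order.
lemma sorted2_desc_id (xs : List (Int × Int))
    (h : xs.Pairwise (fun a b => b.1 < a.1)) :
    PySem.List.sorted2 xs Prod.fst Prod.snd true = xs := by
  have aux : ∀ (ys acc : List (Int × Int)),
      (acc ++ ys).Pairwise (fun a b => b.1 < a.1) →
      ys.foldl (fun acc x =>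
        PySem.List.insertBy (fun a b =>
          decide (b.1 < a.1) || (!decide (a.1 < b.1) && decide (b.2 < a.2))) x acc) acc
        = acc ++ ys := by
    intro ys
    induction ys with
    | nil => intro acc _; simp
    | cons x t ih =>
      intro acc hp
      have hins : PySem.List.insertBy (fun a b =>
          decide (b.1 < a.1) || (!decide (a.1 < b.1) && decide (b.2 < a.2))) x acc
          = acc ++ [x] := by
        apply PySem.List.insertBy_of_forall_not_before
        intro y hy
        have hxy : x.1 < y.1 := by
          rcases (List.pairwise_append.mp hp) with ⟨_, _, hcross⟩
          exact hcross y hy x (by simp)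
        simp [not_lt.mpr (le_of_lt hxy), hxy]
      have hp' : ((acc ++ [x]) ++ t).Pairwise (fun a b => b.1 < a.1) := by
        simpa using hp
      calc (x :: t).foldl (fun acc x =>
            PySem.List.insertBy (fun a b =>
              decide (b.1 < a.1) || (!decide (a.1 < b.1) && decide (b.2 < a.2))) x acc) acc
          = t.foldl (fun acc x =>
              PySem.List.insertBy (fun a b =>
                decide (b.1 < a.1) || (!decide (a.1 < b.1) && decide (b.2 < a.2))) x acc)
              (acc ++ [x]) := by rw [List.foldl_cons, hins]
        _ = (acc ++ [x]) ++ t := ih _ hp'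
        _ = acc ++ x :: t := by simp
  have := aux xs [] (by simpa using h)
  simpa [PySem.List.sorted2] using this

lemma pvMid_pairwise (t step : Int) (hstep : 1 ≤ step) (c : Nat) :
    (pvMid t step c).Pairwise (fun a b => b.1 < a.1) := by
  unfold pvMid
  rw [List.pairwise_map]
  refine List.Pairwise.imp ?_ (List.pairwise_lt_range)
  intro i j hij
  have hmul : step * (i : Int) < step * (j : Int) :=
    mul_lt_mul_of_pos_left (by exact_mod_cast hij) (by omega)
  dsimp only
  omega

-- An append-only filtering loop accumulated by cons, as a reversed filter-map.
lemma pvFoldl_cons_ite {α β : Type} (p : α → Prop) [DecidablePred p] (f : α → β)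
    (l : List α) (acc : List β) :
    l.foldl (fun acc x => if p x then f x :: acc else acc) acc
      = ((l.filter (fun x => decide (p x))).map f).reverse ++ acc := by
  induction l generalizing acc with
  | nil => simp
  | cons x t ih =>
    by_cases hx : p x <;> simp [hx, ih]

-- Strided sampling of the descending partition list, characterised as pvMid.
lemma slice?_stride_char (t : Int) (N : Nat) (hN : 0 < N) (step : Int) (hstep : 1 ≤ step) :
    (PySem.List.slice? ((List.range N).map (fun (k : Nat) => ((t - 2 - (k : Int), 2 + (k : Int)) : Int × Int)))
        none none step).getD []
      = pvMid t step (((N : Int) + step - 1) / step).toNat := by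
  have hstep0 : ¬ step = 0 := by omega
  have hstepneg : ¬ step < 0 := by omega
  have hpos : (0 : Int) < step := by omega
  have hNpos : (0 : Int) < (N : Int) := by exact_mod_cast hN
  have hlen : ((List.range N).map (fun (k : Nat) => ((t - 2 - (k : Int), 2 + (k : Int)) : Int × Int))).length = N := by
    simp
  unfold PySem.List.slice? PySem.List.sliceIndices
  simp only [hstep0, if_false, hstepneg, hlen, hpos, if_true, hNpos, Option.getD_some]
  rw [show ((N : Int) - 0 + step - 1) = ((N : Int) + step - 1) from by ring]
  have hfm : List.filterMap
      (fun (k : Nat) => ((List.range N).map (fun (k : Nat) => ((t - 2 - (k : Int), 2 + (k : Int)) : Int × Int)))[(0 + step * (k : Int)).toNat]?)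
      (List.range (((N : Int) + step - 1) / step).toNat)
      = List.map (fun (k : Nat) => ((t - 2 - step * (k : Int), 2 + step * (k : Int)) : Int × Int))
          (List.range (((N : Int) + step - 1) / step).toNat) := by
    apply List.filterMap_eq_map_iff_forall_eq_some.mpr
    intro k hk
    have hk' : (k : Int) < ((N : Int) + step - 1) / step := by
      have := List.mem_range.mp hk
      omega
    have hkN : step * (k : Int) < (N : Int) := by
      have h1 : (k : Int) + 1 ≤ ((N : Int) + step - 1) / step := by omega
      have h2 : ((k : Int) + 1) * step ≤ (N : Int) + step - 1 :=
        (Int.le_ediv_iff_mul_le hpos).mp h1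
      nlinarith
    have hnn : (0 : Int) ≤ step * (k : Int) := by positivity
    have hidx : (0 + step * (k : Int)).toNat < N := by omega
    rw [List.getElem?_map, List.getElem?_range hidx]
    have hcast : (((0 + step * (k : Int)).toNat : Int)) = step * (k : Int) := by omega
    simp only [Option.map_some, hcast]
  rw [hfm]
  unfold pvMid
  rfl


-- A's result, characterised.
lemma A_char (t g : Int) (ht : 5 ≤ t) (hg : 1 ≤ g) :
    divide_cubes_py t g
      = pvMid t (max 1 ((t - 2 - t / 2) / g)) (min (t - 2 - t / 2) g).toNat := by
  have hfd : PySem.Int.floordiv t 2 = t / 2 := PySem.Int.floordiv_eq_ediv_of_pos (by omega)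
  set n : Int := t - 2 - t / 2 with hn_def
  clear_value n
  have hn1 : 1 ≤ n := by omega
  have hnot : ¬ (t - 2 < 2) := by omega
  -- the loop builds the full descending partition list
  have hposs :
      ((PySem.List.pyRange (t - 2) (PySem.Int.floordiv t 2) (-1)).foldl
        (fun acc prefill =>
          if 2 ≤ t - prefill ∧ t - prefill ≤ prefill then (prefill, t - prefill) :: acc else acc) []).reverse
      = (List.range n.toNat).map (fun (k : Nat) => ((t - 2 - (k : Int), 2 + (k : Int)) : Int × Int)) := by
    rw [pvFoldl_cons_ite (p := fun prefill => 2 ≤ t - prefill ∧ t - prefill ≤ prefill)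
        (f := fun prefill => (prefill, t - prefill))]
    rw [List.append_nil, List.reverse_reverse]
    rw [List.filter_eq_self.mpr]
    · rw [hfd, PySem.List.pyRange_neg_one, List.map_map]
      have harg : (t - 2 - t / 2).toNat = n.toNat := by omega
      rw [harg]
      apply List.map_congr_left
      intro k _
      simp only [Function.comp_apply, Prod.ext_iff]
      exact ⟨trivial, by omega⟩
    · intro x hx
      rw [hfd] at hx
      have := (PySem.List.mem_pyRange_neg_one).mp hx
      simp only [decide_eq_true_eq]
      omega
  have hlen : ((List.range n.toNat).map
      (fun (k : Nat) => ((t - 2 - (k : Int), 2 + (k : Int)) : Int × Int))).length = n.toNat := by simp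
  have hne : (List.range n.toNat).map
      (fun (k : Nat) => ((t - 2 - (k : Int), 2 + (k : Int)) : Int × Int)) ≠ [] := by
    intro hcontra
    have := congrArg List.length hcontra
    rw [hlen] at this
    simp at this
    omega
  unfold divide_cubes_py
  rw [if_neg hnot]
  simp only [hposs, hlen, if_neg hne]
  have hcast : ((n.toNat : Int)) = n := by omega
  rw [hcast, PySem.Int.floordiv_eq_ediv_of_pos (by omega : (0:Int) < g)]
  by_cases hcase : g ≤ n
  · -- sampled branch
    rw [if_pos hcase]
    set step : Int := max 1 (n / g) with hstep_def
    have hstep1 : 1 ≤ step := le_max_left _ _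
    rw [slice?_stride_char t n.toNat (by omega) step hstep1]
    have hcastN : ((n.toNat : Int)) = n := by omega
    rw [hcastN]
    -- g samples fit: g ≤ ceil(n / step)
    have hdivle : g * step ≤ n + step - 1 := by
      by_cases h1 : n / g ≤ 1
      · have hs1 : step = 1 := by omega
        rw [hs1]; omega
      · have hstep_eq : step = n / g := by omega
        have hmul : g * (n / g) ≤ n := by
          have h := Int.mul_ediv_add_emod n g
          have hm := Int.emod_nonneg n (by omega : g ≠ 0)
          omega
        rw [hstep_eq]; omega
    have hceil : g ≤ (n + step - 1) / step :=
      (Int.le_ediv_iff_mul_le (by omega)).mpr hdivle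
    rw [PySem.List.slice_to _ (by omega : (0:Int) ≤ g)]
    unfold pvMid
    rw [← List.map_take, List.take_range]
    have hmin : min g.toNat ((n + step - 1) / step).toNat = (min n g).toNat := by omega
    rw [hmin]
    apply sorted2_desc_id
    have hpw := pvMid_pairwise t step hstep1 ((min n g).toNat)
    unfold pvMid at hpw
    exact hpw
  · -- all partitions
    rw [if_neg hcase]
    have hng : n < g := by omega
    have hdiv0 : n / g = 0 := Int.ediv_eq_zero_of_lt (by omega) (by omega)
    have hstep_eq : max 1 (n / g) = 1 := by rw [hdiv0]; omega
    have hminn : (min n g).toNat = n.toNat := by omega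
    rw [hstep_eq, hminn]
    have hmid : pvMid t 1 n.toNat
        = (List.range n.toNat).map (fun (k : Nat) => ((t - 2 - (k : Int), 2 + (k : Int)) : Int × Int)) := by
      unfold pvMid
      apply List.map_congr_left
      intro k _
      simp
    rw [hmid]
    apply sorted2_desc_id
    have hpw := pvMid_pairwise t 1 le_rfl n.toNat
    rw [hmid] at hpw
    exact hpw

-- B's result, characterised.
lemma B_char (t g : Int) (ht : 5 ≤ t) (hg : 1 ≤ g) :
    divide_cubes_py_alt t g
      = pvMid t (max 1 ((t - 2 - t / 2) / g)) (min (t - 2 - t / 2) g).toNat := by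
  have hfd : PySem.Int.floordiv t 2 = t / 2 := PySem.Int.floordiv_eq_ediv_of_pos (by omega)
  unfold divide_cubes_py_alt
  simp only [hfd]
  rw [PySem.Int.floordiv_eq_ediv_of_pos (by omega : (0:Int) < g)]
  have hn1 : 1 ≤ t - 2 - t / 2 := by omega
  rw [if_neg (by omega : ¬ t - 2 - t / 2 ≤ 0)]
  rw [PySem.List.pyRange_one, List.map_map]
  unfold pvMid
  have harg : (min (t - 2 - t / 2) g - 0).toNat = (min (t - 2 - t / 2) g).toNat := by
    norm_num
  rw [harg]
  apply List.map_congr_left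
  intro k _
  simp only [Function.comp_apply, Prod.ext_iff]
  exact ⟨by ring, by ring⟩

-- ===== VERDICT (by name: the statement is the Claim_ definition above) =====
theorem divide_cubes_py_spec : Claim_equal_divide_cubes_py := by
  intro t g _ hpre
  unfold Spec_divide_cubes_py
  rw [A_char t g hpre.1 hpre.2, B_char t g hpre.1 hpre.2]
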